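-- pv_equiv track=rewrite | github.com/sakthivelvjkumar/PickPal | pickpal-complete/backend/src/ranker/agent.py | _extract_key_negatives
-- ===== SOURCE A (Python) =====
-- from typing import List, Dict
--
-- def _extract_key_negatives(negative_reviews: List[Dict]) -> List[str]:
--     """Extract key negative points from low-rated reviews."""
--     negatives = []
--     for review in negative_reviews:
--         text = review.get("text", "").lower()
--         if "battery" in text and ("drain" in text or "short" in text or "disappointing" in text):
--             negatives.append("Battery life concerns")
--         elif "bulky" in text or "big" in text:
--             negatives.append("Somewhat bulky design")
--         elif "connectivity" in text or "connection" in text or "drop" in text: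
--             negatives.append("Occasional connectivity issues")
--         elif "expensive" in text or "overpriced" in text:
--             negatives.append("Higher price point")
--         elif "control" in text and "sensitive" in text:
--             negatives.append("Sensitive touch controls")
--         elif "compatibility" in text or "android" in text:
--             negatives.append("Limited compatibility with some devices")
--
--     # Remove duplicates and limit
--     return list(dict.fromkeys(negatives))[:3] or ["Some users reported minor issues"]
-- ===== SOURCE B (Python) =====
-- from typing import List, Dict
--
-- _LABELS = [
--     "Battery life concerns",
--     "Somewhat bulky design",
--     "Occasional connectivity issues",
--     "Higher price point",
--     "Sensitive touch controls",
--     "Limited compatibility with some devices",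
-- ]
--
--
-- def _classify(text):
--     """Category label of one lowercased review text, or None."""
--     if "battery" in text and ("drain" in text or "short" in text or "disappointing" in text):
--         return "Battery life concerns"
--     if "bulky" in text or "big" in text:
--         return "Somewhat bulky design"
--     if "connectivity" in text or "connection" in text or "drop" in text:
--         return "Occasional connectivity issues"
--     if "expensive" in text or "overpriced" in text:
--         return "Higher price point"
--     if "control" in text and "sensitive" in text:
--         return "Sensitive touch controls"
--     if "compatibility" in text or "android" in text:
--         return "Limited compatibility with some devices"
--     return None
--
--
-- def _extract_key_negatives(negative_reviews: List[Dict]) -> List[str]: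
--     """Category-major version: classify all reviews, then rank the labels that
--     occur by the position of their first occurrence and keep the top 3."""
--     cats = [_classify(r.get("text", "").lower()) for r in negative_reviews]
--     firsts = [(cats.index(label), label) for label in _LABELS if label in cats]
--     firsts.sort(key=lambda p: p[0])
--     top = [label for _, label in firsts[:3]]
--     return top if top else ["Some users reported minor issues"]
-- ===== Notes on version B (the rewrite author's own statement) =====
-- stated objective: alternative
-- what changed: Replaces A's review-major pass (append one label per review, then dedup and slice) by a category-major algorithm: classify all reviews into a list once, then for each of the six labels find the index of its first occurrence, sort the (index, label) pairs by index and keep the first three labels.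
import Mathlib
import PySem

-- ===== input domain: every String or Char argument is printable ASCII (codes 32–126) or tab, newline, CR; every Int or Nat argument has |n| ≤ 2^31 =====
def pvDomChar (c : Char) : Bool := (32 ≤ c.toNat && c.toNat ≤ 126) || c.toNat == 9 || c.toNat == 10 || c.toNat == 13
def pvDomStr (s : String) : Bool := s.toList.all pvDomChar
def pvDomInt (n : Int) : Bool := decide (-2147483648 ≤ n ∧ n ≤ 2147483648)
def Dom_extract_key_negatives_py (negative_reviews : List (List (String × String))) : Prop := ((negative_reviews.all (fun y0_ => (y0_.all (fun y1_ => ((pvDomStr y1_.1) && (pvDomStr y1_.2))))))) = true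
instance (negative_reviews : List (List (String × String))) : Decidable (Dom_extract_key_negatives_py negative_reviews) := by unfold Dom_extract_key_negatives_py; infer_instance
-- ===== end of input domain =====

-- B replaces A's review-major pass (append a label per review, dedup at the end) by a
-- category-major algorithm: classify every review once, then for each of the six labels find the
-- index of its first occurrence, sort the (index, label) pairs and keep the first three labels
-- (objective: alternative; same asymptotic cost).

-- ===== PORT A =====
def extract_key_negatives_py (negative_reviews : List (List (String × String))) : List String :=
  let negatives := negative_reviews.foldl (fun negatives review =>
    let text := PySem.Str.lower (PySem.Dict.getD (PySem.Dict.mk review) "text" "")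
    if PySem.Str.isIn "battery" text &&
        (PySem.Str.isIn "drain" text || PySem.Str.isIn "short" text || PySem.Str.isIn "disappointing" text) then
      negatives ++ ["Battery life concerns"]
    else if PySem.Str.isIn "bulky" text || PySem.Str.isIn "big" text then
      negatives ++ ["Somewhat bulky design"]
    else if PySem.Str.isIn "connectivity" text || PySem.Str.isIn "connection" text || PySem.Str.isIn "drop" text then
      negatives ++ ["Occasional connectivity issues"]
    else if PySem.Str.isIn "expensive" text || PySem.Str.isIn "overpriced" text then
      negatives ++ ["Higher price point"]
    else if PySem.Str.isIn "control" text && PySem.Str.isIn "sensitive" text then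
      negatives ++ ["Sensitive touch controls"]
    else if PySem.Str.isIn "compatibility" text || PySem.Str.isIn "android" text then
      negatives ++ ["Limited compatibility with some devices"]
    else negatives) []
  let res := PySem.List.slice (PySem.List.dedup negatives) none (some 3)
  if res.isEmpty then ["Some users reported minor issues"] else res

-- ===== PORT B =====
-- Source B's _LABELS constant
def pvLABELS : List String :=
  ["Battery life concerns", "Somewhat bulky design", "Occasional connectivity issues",
   "Higher price point", "Sensitive touch controls", "Limited compatibility with some devices"]

-- Source B's _classify: category label of one lowercased review text, or None
def pvClassify (text : String) : Option String :=
  if PySem.Str.isIn "battery" text &&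
      (PySem.Str.isIn "drain" text || PySem.Str.isIn "short" text || PySem.Str.isIn "disappointing" text) then
    some "Battery life concerns"
  else if PySem.Str.isIn "bulky" text || PySem.Str.isIn "big" text then
    some "Somewhat bulky design"
  else if PySem.Str.isIn "connectivity" text || PySem.Str.isIn "connection" text || PySem.Str.isIn "drop" text then
    some "Occasional connectivity issues"
  else if PySem.Str.isIn "expensive" text || PySem.Str.isIn "overpriced" text then
    some "Higher price point"
  else if PySem.Str.isIn "control" text && PySem.Str.isIn "sensitive" text then
    some "Sensitive touch controls"
  else if PySem.Str.isIn "compatibility" text || PySem.Str.isIn "android" text then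
    some "Limited compatibility with some devices"
  else none

def extract_key_negatives_py_alt (negative_reviews : List (List (String × String))) : List String :=
  let cats := negative_reviews.map (fun r =>
    pvClassify (PySem.Str.lower (PySem.Dict.getD (PySem.Dict.mk r) "text" "")))
  -- [(cats.index(label), label) for label in _LABELS if label in cats]
  -- (cats.index is total here: the filter guarantees membership, so the getD default is never used)
  let firsts := (pvLABELS.filter (fun label => cats.contains (some label))).map
    (fun label => ((PySem.List.index? cats (some label)).getD 0, label))
  let sortedFirsts := PySem.List.sorted firsts (fun p => p.1) false
  let top := (PySem.List.slice sortedFirsts none (some 3)).map (fun p => p.2)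
  if top.isEmpty then ["Some users reported minor issues"] else top

-- ===== PRECONDITION & SPEC =====
def Spec_extract_key_negatives_py (negative_reviews : List (List (String × String))) (out : List String) : Prop := out = extract_key_negatives_py_alt negative_reviews
instance (negative_reviews : List (List (String × String))) (out : List String) : Decidable (Spec_extract_key_negatives_py negative_reviews out) := by unfold Spec_extract_key_negatives_py; infer_instance

-- ===== CLAIM (what is proved, stated in full; the proofs are below) =====
def Claim_equal_extract_key_negatives_py : Prop := ∀ (negative_reviews : List (List (String × String))), Dom_extract_key_negatives_py negative_reviews → Spec_extract_key_negatives_py negative_reviews (extract_key_negatives_py negative_reviews)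

-- ===== LEMMAS AND PROOFS =====

-- the per-review classification list of B
def pvCats (reviews : List (List (String × String))) : List (Option String) :=
  reviews.map (fun r => pvClassify (PySem.Str.lower (PySem.Dict.getD (PySem.Dict.mk r) "text" "")))

-- index of the first occurrence of label L in cats (B's cats.index(L))
def pvFIdx (cats : List (Option String)) (L : String) : Nat :=
  (PySem.List.index? cats (some L)).getD 0

-- A's per-review branch chain appends exactly pvClassify's label
theorem pvStepA_eq (acc : List String) (text : String) :
    (if PySem.Str.isIn "battery" text &&
        (PySem.Str.isIn "drain" text || PySem.Str.isIn "short" text || PySem.Str.isIn "disappointing" text) then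
      acc ++ ["Battery life concerns"]
    else if PySem.Str.isIn "bulky" text || PySem.Str.isIn "big" text then
      acc ++ ["Somewhat bulky design"]
    else if PySem.Str.isIn "connectivity" text || PySem.Str.isIn "connection" text || PySem.Str.isIn "drop" text then
      acc ++ ["Occasional connectivity issues"]
    else if PySem.Str.isIn "expensive" text || PySem.Str.isIn "overpriced" text then
      acc ++ ["Higher price point"]
    else if PySem.Str.isIn "control" text && PySem.Str.isIn "sensitive" text then
      acc ++ ["Sensitive touch controls"]
    else if PySem.Str.isIn "compatibility" text || PySem.Str.isIn "android" text then
      acc ++ ["Limited compatibility with some devices"]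
    else acc) = acc ++ (pvClassify text).toList := by
  unfold pvClassify
  repeat' split
  all_goals simp_all

-- A's accumulation loop produces exactly the classification list with the Nones dropped
theorem pvALoop_eq (reviews : List (List (String × String))) :
    reviews.foldl (fun negatives review =>
      let text := PySem.Str.lower (PySem.Dict.getD (PySem.Dict.mk review) "text" "")
      if PySem.Str.isIn "battery" text &&
          (PySem.Str.isIn "drain" text || PySem.Str.isIn "short" text || PySem.Str.isIn "disappointing" text) then
        negatives ++ ["Battery life concerns"]
      else if PySem.Str.isIn "bulky" text || PySem.Str.isIn "big" text then
        negatives ++ ["Somewhat bulky design"]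
      else if PySem.Str.isIn "connectivity" text || PySem.Str.isIn "connection" text || PySem.Str.isIn "drop" text then
        negatives ++ ["Occasional connectivity issues"]
      else if PySem.Str.isIn "expensive" text || PySem.Str.isIn "overpriced" text then
        negatives ++ ["Higher price point"]
      else if PySem.Str.isIn "control" text && PySem.Str.isIn "sensitive" text then
        negatives ++ ["Sensitive touch controls"]
      else if PySem.Str.isIn "compatibility" text || PySem.Str.isIn "android" text then
        negatives ++ ["Limited compatibility with some devices"]
      else negatives) [] = (pvCats reviews).filterMap id := by
  have h := PySem.List.foldl_congr_mem
    (l := reviews) (init := ([] : List String))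
    (f := fun negatives review =>
      let text := PySem.Str.lower (PySem.Dict.getD (PySem.Dict.mk review) "text" "")
      if PySem.Str.isIn "battery" text &&
          (PySem.Str.isIn "drain" text || PySem.Str.isIn "short" text || PySem.Str.isIn "disappointing" text) then
        negatives ++ ["Battery life concerns"]
      else if PySem.Str.isIn "bulky" text || PySem.Str.isIn "big" text then
        negatives ++ ["Somewhat bulky design"]
      else if PySem.Str.isIn "connectivity" text || PySem.Str.isIn "connection" text || PySem.Str.isIn "drop" text then
        negatives ++ ["Occasional connectivity issues"]
      else if PySem.Str.isIn "expensive" text || PySem.Str.isIn "overpriced" text then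
        negatives ++ ["Higher price point"]
      else if PySem.Str.isIn "control" text && PySem.Str.isIn "sensitive" text then
        negatives ++ ["Sensitive touch controls"]
      else if PySem.Str.isIn "compatibility" text || PySem.Str.isIn "android" text then
        negatives ++ ["Limited compatibility with some devices"]
      else negatives)
    (g := fun acc review =>
      acc ++ (pvClassify (PySem.Str.lower (PySem.Dict.getD (PySem.Dict.mk review) "text" ""))).toList)
    (fun acc review _ => pvStepA_eq acc _)
  rw [h, PySem.List.foldl_append_eq_flatMap, pvCats, List.filterMap_map]
  exact (List.filterMap_eq_flatMap_toList _ reviews).symm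

-- pvClassify only produces the six labels
theorem pvClassify_mem (t : String) (L : String) (h : pvClassify t = some L) : L ∈ pvLABELS := by
  unfold pvClassify at h
  repeat' split at h
  all_goals simp_all [pvLABELS]

-- first-occurrence index shifts by one under a non-matching head
theorem pvFIdx_cons_of_ne (c : Option String) (cs : List (Option String)) (L : String)
    (hne : c ≠ some L) (hm : some L ∈ cs) : pvFIdx (c :: cs) L = pvFIdx cs L + 1 := by
  unfold pvFIdx
  rw [PySem.List.index?_cons_of_ne cs hne]
  obtain ⟨k, hk⟩ := Option.isSome_iff_exists.mp ((PySem.List.index?_isSome_iff _ _).mpr hm)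
  simp only [PySem.List.index?_eq_idxOf?] at hk
  simp [hk]

-- PySem.List.dedup peels its head, filtering later copies
theorem pv_dedup_cons (a : String) (l : List String) :
    PySem.List.dedup (a :: l) = a :: (PySem.List.dedup l).filter (fun y => !(PySem.Set.contains [a] y)) := by
  rw [PySem.List.dedup_eq_ofList, PySem.List.dedup_eq_ofList]
  show PySem.Set.update [a] l = _
  rw [PySem.Set.update_eq_append_filter]
  rfl

-- dedup lists labels in strictly increasing order of first occurrence in cats
theorem pvQ (cats : List (Option String)) :
    (PySem.List.dedup (cats.filterMap id)).Pairwise (fun L M => pvFIdx cats L < pvFIdx cats M) := by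
  induction cats with
  | nil => simp [PySem.List.dedup_eq_ofList, PySem.Set.ofList]
  | cons c cs ih =>
    have hmemd : ∀ L, L ∈ PySem.List.dedup (cs.filterMap id) → some L ∈ cs := by
      intro L hL
      rw [PySem.List.mem_dedup] at hL
      simpa using (List.mem_filterMap.mp hL)
    cases c with
    | none =>
      have : (none :: cs).filterMap (id : Option String → Option String) = cs.filterMap id := by
        simp
      rw [this]
      refine List.Pairwise.imp_of_mem (fun {L M} hL hM h => ?_) ih
      rw [pvFIdx_cons_of_ne _ _ _ (by simp) (hmemd L hL),
          pvFIdx_cons_of_ne _ _ _ (by simp) (hmemd M hM)]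
      omega
    | some a =>
      have : (some a :: cs).filterMap (id : Option String → Option String) = a :: cs.filterMap id := by
        simp
      rw [this, pv_dedup_cons]
      refine List.Pairwise.cons ?_ ?_
      · intro M hM
        have hMne : M ≠ a := by
          have := (List.mem_filter.mp hM).2
          simpa [PySem.Set.contains] using this
        have hMcs : some M ∈ cs := hmemd M (List.mem_of_mem_filter hM)
        have ha0 : pvFIdx (some a :: cs) a = 0 := by
          unfold pvFIdx
          rw [PySem.List.index?_cons_self]
          rfl
        rw [ha0, pvFIdx_cons_of_ne _ _ _ (by simp [hMne.symm]) hMcs]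
        omega
      · refine List.Pairwise.imp_of_mem (fun {L M} hL hM h => ?_) (List.Pairwise.filter _ ih)
        have hLne : L ≠ a := by
          have := (List.mem_filter.mp hL).2
          simpa [PySem.Set.contains] using this
        have hMne : M ≠ a := by
          have := (List.mem_filter.mp hM).2
          simpa [PySem.Set.contains] using this
        rw [pvFIdx_cons_of_ne _ _ _ (by simp [hLne.symm]) (hmemd L (List.mem_of_mem_filter hL)),
            pvFIdx_cons_of_ne _ _ _ (by simp [hMne.symm]) (hmemd M (List.mem_of_mem_filter hM))]
        omega

-- B's sorted (index, label) list is exactly dedup of the label stream, paired with its indices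
theorem pvSorted_eq (cats : List (Option String))
    (hcod : ∀ L, some L ∈ cats → L ∈ pvLABELS) :
    PySem.List.sorted
        ((pvLABELS.filter (fun label => cats.contains (some label))).map
          (fun label => ((PySem.List.index? cats (some label)).getD 0, label)))
        (fun p => p.1) false
      = (PySem.List.dedup (cats.filterMap id)).map
          (fun label => ((PySem.List.index? cats (some label)).getD 0, label)) := by
  apply PySem.List.sorted_eq_of_perm_of_pairwise_lt
  · apply List.Perm.map
    rw [List.perm_ext_iff_of_nodup (PySem.List.nodup_dedup _)
        (List.Nodup.filter _ (by decide : pvLABELS.Nodup))]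
    intro L
    rw [PySem.List.mem_dedup, List.mem_filter]
    simp only [List.mem_filterMap, id_eq, List.contains_iff_mem]
    constructor
    · rintro ⟨o, ho, rfl⟩
      exact ⟨hcod L ho, by simpa using ho⟩
    · rintro ⟨-, h⟩
      exact ⟨some L, by simpa using h, rfl⟩
  · rw [List.pairwise_map]
    exact pvQ cats

-- ===== VERDICT (by name: the statement is the Claim_ definition above) =====
theorem extract_key_negatives_py_spec : Claim_equal_extract_key_negatives_py := by
  intro reviews _
  unfold Spec_extract_key_negatives_py extract_key_negatives_py extract_key_negatives_py_alt
  dsimp only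
  rw [pvALoop_eq]
  have hcod : ∀ L, some L ∈ pvCats reviews → L ∈ pvLABELS := by
    intro L hL
    obtain ⟨r, -, hr⟩ := List.mem_map.mp hL
    exact pvClassify_mem _ _ hr
  have hfold : (reviews.map (fun r =>
      pvClassify (PySem.Str.lower (PySem.Dict.getD (PySem.Dict.mk r) "text" "")))) = pvCats reviews := rfl
  rw [hfold, pvSorted_eq (pvCats reviews) hcod]
  rw [PySem.List.slice_to _ (by norm_num), PySem.List.slice_to _ (by norm_num)]
  rw [← List.map_take, List.map_map]
  simp [Function.comp_def]
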